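-- pv_equiv track=rewrite | github.com/Block-Bench/base | strategies/crossdomain/crossdomain.py | recombine_identifier
-- ===== SOURCE A (Python) =====
-- from typing import Optional, Dict, List, Set, Tuple, Any
--
-- def recombine_identifier(words: List[str], style: str) -> str:
--     """Recombine words into identifier using specified style."""
--     if style == 'snake':
--         return '_'.join(w.lower() for w in words)
--     elif style == 'pascal':
--         return ''.join(w.capitalize() for w in words)
--     elif style == 'camel':
--         if not words:
--             return ''
--         return words[0].lower() + ''.join(w.capitalize() for w in words[1:])
--     else:
--         return ''.join(words)
-- ===== SOURCE B (Python) =====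
-- def recombine_identifier(words, style):
--     """Recombine words into identifier using specified style.
--
--     Char-level single pass: instead of per-style join/capitalize/lower
--     expressions, walk every character once, lowercasing by default and
--     uppercasing word-initial characters where the style demands it.
--     """
--     if style not in ('snake', 'pascal', 'camel'):
--         return ''.join(words)
--     out = []
--     for wi, w in enumerate(words):
--         if style == 'snake' and wi > 0:
--             out.append('_')
--         for ci, ch in enumerate(w):
--             if ci == 0 and (style == 'pascal' or (style == 'camel' and wi > 0)):
--                 out.append(ch.upper())
--             else:
--                 out.append(ch.lower())
--     return ''.join(out)
-- ===== Notes on version B (the rewrite author's own statement) =====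
-- stated objective: alternative
-- what changed: Replaced the four per-style join/capitalize/lower string expressions by one char-level pass: walk every character of every word once, lowercasing by default and uppercasing word-initial characters where the style demands, emitting '_' separators inline for snake.
import Mathlib
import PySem

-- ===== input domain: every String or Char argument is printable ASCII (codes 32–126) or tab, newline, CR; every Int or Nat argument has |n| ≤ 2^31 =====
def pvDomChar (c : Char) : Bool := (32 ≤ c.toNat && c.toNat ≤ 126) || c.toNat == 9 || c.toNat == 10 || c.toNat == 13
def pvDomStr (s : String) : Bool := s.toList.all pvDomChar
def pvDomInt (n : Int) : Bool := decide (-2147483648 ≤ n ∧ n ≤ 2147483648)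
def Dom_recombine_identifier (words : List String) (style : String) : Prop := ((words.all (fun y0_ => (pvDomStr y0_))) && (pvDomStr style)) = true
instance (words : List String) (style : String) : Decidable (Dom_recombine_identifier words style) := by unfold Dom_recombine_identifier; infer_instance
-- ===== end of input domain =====

-- ===== PORT A =====
-- Header: B replaces the per-style join/capitalize/lower expressions by one char-level pass
-- that lowercases by default and uppercases word-initial chars where the style demands (objective: alternative decomposition, same cost).
-- str.capitalize on the ASCII domain: uppercase first char, lowercase the rest — exact here.
def pyCapitalize (s : String) : String :=
  match s.toList with
  | [] => ""
  | c :: cs => String.ofList (PySem.Chars.upperChar c :: PySem.Chars.lower cs)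

def recombine_identifier (words : List String) (style : String) : String :=
  if style == "snake" then
    PySem.Str.join "_" (words.map (fun w => PySem.Str.lower w))
  else if style == "pascal" then
    PySem.Str.join "" (words.map (fun w => pyCapitalize w))
  else if style == "camel" then
    match words with
    | [] => ""
    | w :: rest => PySem.Str.lower w ++ PySem.Str.join "" (rest.map (fun w => pyCapitalize w))
  else
    PySem.Str.join "" words

-- ===== PORT B =====
-- Char-level single pass (Source B): walk each character once, lowercasing by default,
-- uppercasing word-initial characters where the style demands, inserting '_' before
-- non-first words for snake; unknown styles concatenate the raw words.
def recombine_identifier_alt (words : List String) (style : String) : String :=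
  if style == "snake" || style == "pascal" || style == "camel" then
    let out : List String := (PySem.List.enumerate words 0).foldl (fun acc p =>
      (PySem.List.enumerate p.2.toList 0).foldl (fun a q =>
        a ++ [if q.1 == 0 && (style == "pascal" || (style == "camel" && decide (0 < p.1)))
              then String.ofList [PySem.Chars.upperChar q.2]
              else String.ofList [PySem.Chars.lowerChar q.2]])
        (if style == "snake" && decide (0 < p.1) then acc ++ ["_"] else acc)) []
    PySem.Str.join "" out
  else
    PySem.Str.join "" words

-- ===== PRECONDITION & SPEC =====
def Spec_recombine_identifier (words : List String) (style : String) (out : String) : Prop := out = recombine_identifier_alt words style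
instance (words : List String) (style : String) (out : String) : Decidable (Spec_recombine_identifier words style out) := by unfold Spec_recombine_identifier; infer_instance

-- ===== CLAIM =====
def Claim_equal_recombine_identifier : Prop := ∀ (words : List String) (style : String), Dom_recombine_identifier words style → Spec_recombine_identifier words style (recombine_identifier words style)

-- ===== LEMMAS AND PROOFS =====

theorem str_ext {a b : String} (h : a.toList = b.toList) : a = b := by
  calc a = String.ofList a.toList := String.ofList_toList.symm
    _ = String.ofList b.toList := by rw [h]
    _ = b := String.ofList_toList

-- '' .join at the char-list level is flatten
theorem join_empty_eq_flatten : ∀ (M : List (List Char)), PySem.Chars.join [] M = M.flatten := by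
  intro M
  induction M with
  | nil => simp [PySem.Chars.join_nil]
  | cons a M ih =>
    cases M with
    | nil => simp [PySem.Chars.join_singleton]
    | cons b M => simp [PySem.Chars.join_cons_cons] at ih ⊢; simp [ih]

theorem j0_toList (L : List String) :
    (PySem.Str.join "" L).toList = (L.map String.toList).flatten := by
  rw [PySem.Str.toList_join]
  exact join_empty_eq_flatten _

-- sep.join of a cons, as head ++ flatMap of (sep ++ ·)
theorem joinSep (sep : List Char) : ∀ (l : List (List Char)) (a : List Char),
    PySem.Chars.join sep (a :: l) = a ++ l.flatMap (fun x => sep ++ x) := by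
  intro l
  induction l with
  | nil => intro a; simp [PySem.Chars.join_singleton]
  | cons b l ih => intro a; simp [PySem.Chars.join_cons_cons, ih]

-- the B loop: conditional separator then per-char appends, as one flatMap
theorem foldl_sep_inner (c : Int × String → Bool) (h : Int × String → Int × Char → String) :
    ∀ (l : List (Int × String)) (acc : List String),
    l.foldl (fun acc p =>
      (PySem.List.enumerate p.2.toList 0).foldl (fun a q => a ++ [h p q])
        (if c p then acc ++ ["_"] else acc)) acc
    = acc ++ l.flatMap (fun p =>
        (if c p then ["_"] else []) ++ (PySem.List.enumerate p.2.toList 0).map (h p)) := by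
  intro l
  induction l with
  | nil => intro acc; simp
  | cons p l ih =>
    intro acc
    simp only [List.foldl_cons]
    rw [PySem.List.foldl_append_singleton_eq_map, ih]
    split_ifs with hc <;> simp [hc]

-- an index-only-through-snd map over an enumeration is a map over the list
theorem enum_map_snd {α β : Type} (f : α → β) : ∀ (xs : List α) (s : Int),
    (PySem.List.enumerate xs s).map (fun p => f p.2) = xs.map f := by
  intro xs
  induction xs with
  | nil => intro s; simp [PySem.List.enumerate_nil]
  | cons x xs ih => intro s; simp [PySem.List.enumerate_cons, ih]

-- with a positive start index, the i == 0 branch never fires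
theorem enum_map_pos {α β : Type} (f g : α → β) : ∀ (xs : List α) (s : Int), 1 ≤ s →
    (PySem.List.enumerate xs s).map (fun p => if p.1 == 0 then f p.2 else g p.2)
      = xs.map g := by
  intro xs
  induction xs with
  | nil => intro s _; simp [PySem.List.enumerate_nil]
  | cons x xs ih =>
    intro s hs
    have h0 : (s == 0) = false := by simp; omega
    simp only [PySem.List.enumerate_cons, List.map_cons, h0, Bool.false_eq_true, if_false,
      ih (s + 1) (by omega)]

-- with a positive start index, a flatMap over an enumeration with g (s,x) = g' x for s ≥ 1
theorem flatMap_enum_pos {α β : Type} (g : Int × α → List β) (g' : α → List β)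
    (h : ∀ (s : Int) (x : α), 1 ≤ s → g (s, x) = g' x) :
    ∀ (xs : List α) (s : Int), 1 ≤ s → (PySem.List.enumerate xs s).flatMap g = xs.flatMap g' := by
  intro xs
  induction xs with
  | nil => intro s _; simp [PySem.List.enumerate_nil]
  | cons x xs ih =>
    intro s hs
    simp only [PySem.List.enumerate_cons, List.flatMap_cons, h s x hs, ih (s + 1) (by omega)]

theorem flatMap_enum_snd {α β : Type} (g' : α → List β) : ∀ (xs : List α) (s : Int),
    (PySem.List.enumerate xs s).flatMap (fun p => g' p.2) = xs.flatMap g' := by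
  intro xs
  induction xs with
  | nil => intro s; simp [PySem.List.enumerate_nil]
  | cons x xs ih => intro s; simp [PySem.List.enumerate_cons, ih]

theorem flatten_map_flatMap {α : Type} (g : α → List String) (l : List α) :
    ((l.flatMap g).map String.toList).flatten
      = l.flatMap (fun x => ((g x).map String.toList).flatten) := by
  induction l <;> simp [*]

-- per-word all-lower contribution
theorem inner_lower (cs : List Char) :
    (((PySem.List.enumerate cs 0).map (fun q => [PySem.Chars.lowerChar q.2])).flatten)
      = PySem.Chars.lower cs := by
  rw [enum_map_snd (fun c => [PySem.Chars.lowerChar c]) cs 0]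
  induction cs <;> simp [PySem.Chars.lower, *]

-- per-word capitalize contribution
theorem inner_cap (cs : List Char) :
    (((PySem.List.enumerate cs 0).map
        (fun q => if q.1 == 0 then [PySem.Chars.upperChar q.2] else [PySem.Chars.lowerChar q.2])).flatten)
      = (pyCapitalize (String.ofList cs)).toList := by
  cases cs with
  | nil => simp [PySem.List.enumerate_nil, pyCapitalize]
  | cons c r =>
    rw [PySem.List.enumerate_cons]
    simp only [List.map_cons, List.flatten_cons]
    rw [show ((0:Int) == 0) = true from rfl]
    rw [show (0:Int) + 1 = 1 from rfl,
        enum_map_pos (fun c => [PySem.Chars.upperChar c]) (fun c => [PySem.Chars.lowerChar c]) r 1 (by norm_num)]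
    simp only [if_true]
    have : ((r.map (fun c => [PySem.Chars.lowerChar c])).flatten) = PySem.Chars.lower r := by
      induction r <;> simp [PySem.Chars.lower, *]
    simp [pyCapitalize, this]

-- the snake identifier, loop-side and join-side
theorem snake_main : ∀ (ws : List String),
    PySem.Chars.join ['_'] (ws.map (fun w => PySem.Chars.lower w.toList))
      = (PySem.List.enumerate ws 0).flatMap
          (fun p => (if 0 < p.1 then ['_'] else []) ++ PySem.Chars.lower p.2.toList) := by
  intro ws
  cases ws with
  | nil => simp [PySem.List.enumerate_nil, PySem.Chars.join_nil]
  | cons w rest =>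
    rw [List.map_cons, joinSep, PySem.List.enumerate_cons]
    simp only [List.flatMap_cons]
    rw [show (0:Int) + 1 = 1 from rfl,
        flatMap_enum_pos (fun p => (if 0 < p.1 then ['_'] else []) ++ PySem.Chars.lower p.2.toList)
          (fun w => ['_'] ++ PySem.Chars.lower w.toList)
          (by intro t x ht; simp [show (0:Int) < t from by omega]) rest 1 (by norm_num)]
    simp [List.flatMap_map]

theorem toList_ofList (l : List Char) : (String.ofList l).toList = l := by
  simp

-- ===== VERDICT =====
theorem recombine_identifier_spec : Claim_equal_recombine_identifier := by
  intro words style _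
  unfold Spec_recombine_identifier recombine_identifier recombine_identifier_alt
  by_cases hs : style = "snake"
  · subst hs
    have t1 : (("snake":String) == "snake") = true := by decide
    have f1 : (("snake":String) == "pascal") = false := by decide
    have f2 : (("snake":String) == "camel") = false := by decide
    simp only [t1, f1, f2, Bool.true_or, Bool.false_or, Bool.true_and, Bool.false_and,
      Bool.and_false, if_true, if_false, Bool.false_eq_true]
    rw [foldl_sep_inner (fun p => decide (0 < p.1))
        (fun p q => String.ofList [PySem.Chars.lowerChar q.2])]
    apply str_ext
    rw [PySem.Str.toList_join, j0_toList, List.nil_append, flatten_map_flatMap]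
    simp only [List.map_map, List.map_append, List.flatten_append, Function.comp_def,
      PySem.Str.toList_lower, toList_ofList, inner_lower, apply_ite (List.map String.toList),
      apply_ite List.flatten, List.map_cons, List.map_nil, List.flatten_cons, List.flatten_nil,
      List.append_nil, decide_eq_true_eq]
    have : ("_" : String).toList = ['_'] := by decide
    rw [this]
    exact snake_main words
  · by_cases hp : style = "pascal"
    · subst hp
      have t1 : (("pascal":String) == "pascal") = true := by decide
      have f1 : (("pascal":String) == "snake") = false := by decide
      have f2 : (("pascal":String) == "camel") = false := by decide
      rw [foldl_sep_inner (fun p => (("pascal":String) == "snake") && decide (0 < p.1))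
          (fun p q => if q.1 == 0 && (("pascal":String) == "pascal" || (("pascal":String) == "camel" && decide (0 < p.1)))
                      then String.ofList [PySem.Chars.upperChar q.2]
                      else String.ofList [PySem.Chars.lowerChar q.2])]
      simp only [t1, f1, f2, Bool.false_or, Bool.or_false, Bool.false_and, Bool.and_true,
        if_true, if_false, Bool.false_eq_true, List.nil_append]
      apply str_ext
      rw [j0_toList, j0_toList, flatten_map_flatMap]
      simp only [List.map_map, Function.comp_def, toList_ofList, apply_ite String.toList,
        inner_cap, String.ofList_toList]
      rw [← List.flatMap_def, flatMap_enum_snd (fun w => (pyCapitalize w).toList) words 0]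
    · by_cases hc : style = "camel"
      · subst hc
        have t1 : (("camel":String) == "camel") = true := by decide
        have f1 : (("camel":String) == "snake") = false := by decide
        have f2 : (("camel":String) == "pascal") = false := by decide
        rw [foldl_sep_inner (fun p => (("camel":String) == "snake") && decide (0 < p.1))
            (fun p q => if q.1 == 0 && (("camel":String) == "pascal" || (("camel":String) == "camel" && decide (0 < p.1)))
                        then String.ofList [PySem.Chars.upperChar q.2]
                        else String.ofList [PySem.Chars.lowerChar q.2])]
        simp only [t1, f1, f2, Bool.false_or, Bool.or_false, Bool.true_and, Bool.false_and,
          if_true, if_false, Bool.false_eq_true, List.nil_append]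
        cases words with
        | nil =>
          apply str_ext
          rw [j0_toList]
          simp [PySem.List.enumerate_nil]
        | cons w rest =>
          rw [PySem.List.enumerate_cons, List.flatMap_cons,
              show (0:Int) + 1 = 1 from rfl]
          apply str_ext
          rw [j0_toList, String.toList_append, PySem.Str.toList_lower, j0_toList]
          have hrest :
              (PySem.List.enumerate rest 1).flatMap
                (fun p => (PySem.List.enumerate p.2.toList 0).map
                  (fun q => if q.1 == 0 && decide (0 < p.1)
                            then String.ofList [PySem.Chars.upperChar q.2]
                            else String.ofList [PySem.Chars.lowerChar q.2]))
              = rest.flatMap (fun w => (PySem.List.enumerate w.toList 0).map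
                  (fun q => if q.1 == 0
                            then String.ofList [PySem.Chars.upperChar q.2]
                            else String.ofList [PySem.Chars.lowerChar q.2])) := by
            refine flatMap_enum_pos _ _ ?_ rest 1 (by norm_num)
            intro t x ht
            simp [show (0:Int) < t from by omega]
          rw [hrest, List.map_append, List.flatten_append, flatten_map_flatMap]
          simp only [List.map_map, Function.comp_def, toList_ofList,
            apply_ite String.toList, inner_cap, String.ofList_toList]
          simp only [show decide ((0:Int) < 0) = false from rfl, Bool.and_false,
            Bool.false_eq_true, if_false]
          rw [inner_lower]
          simp [← List.flatMap_def]
      · have f1 : (style == "snake") = false := by simp [hs]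
        have f2 : (style == "pascal") = false := by simp [hp]
        have f3 : (style == "camel") = false := by simp [hc]
        simp [f1, f2, f3]
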